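-- pv_equiv track=rewrite | github.com/ymonster/cc_jsonl_fix | repair_jsonl.py | _find_best_branch
-- ===== SOURCE A (Python) =====
-- def _find_best_branch(
--     chain: list[str],
--     chain_set: set[str],
--     children: dict[str, list[str]],
--     uuid_to_parent: dict[str, str | None],
-- ) -> tuple[str, str, str, int] | None:
--     """Return (fork_uuid, chain_child_uuid, branch_tail, branch_len) or None."""
--     best: tuple[str, str, str, int] | None = None
--     best_len = 0
--
--     for i, uid in enumerate(chain):
--         siblings = [c for c in children.get(uid, [])
--                     if c not in chain_set]
--         if not siblings:
--             continue
--
--         if i == 0: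
--             continue  # can't re-parent the very last message
--
--         for sib in siblings:
--             spine = _longest_path(sib, children, chain_set)
--             if len(spine) > best_len:
--                 best_len = len(spine)
--                 best = (uid, chain[i - 1], spine[-1], len(spine))
--
--     return best
--
-- def _longest_path(start: str, children: dict[str, list[str]],
--                   exclude: set[str]) -> list[str]:
--     """DFS to find longest forward path from *start*, excluding nodes in *exclude*."""
--     best: list[str] = []
--     stack: list[tuple[str, list[str], set[str]]] = [
--         (start, [start], {start})
--     ]
--     while stack:
--         node, path, visited = stack.pop()
--         kids = [k for k in children.get(node, []) if k not in exclude and k not in visited]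
--         if not kids:
--             if len(path) > len(best):
--                 best = path
--         else:
--             for kid in kids:
--                 stack.append((kid, path + [kid], visited | {kid}))
--     return best
-- ===== SOURCE B (Python) =====
-- def _find_best_branch(chain, chain_set, children, uuid_to_parent):
--     """Return (fork_uuid, chain_child_uuid, branch_tail, branch_len) or None."""
--
--     def longest(node, visited):
--         # (length, tail) of the longest simple downward path from node; on ties the
--         # path found first by a last-child-first depth-first search wins.
--         visited.add(node)
--         best_l, best_t = 1, node
--         for kid in reversed(children.get(node, ())):
--             if kid in chain_set or kid in visited:
--                 continue
--             l, t = longest(kid, visited)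
--             if l + 1 > best_l:
--                 best_l, best_t = l + 1, t
--         visited.discard(node)
--         return best_l, best_t
--
--     best = None
--     best_len = 0
--     for prev, uid in zip(chain, chain[1:]):
--         for sib in children.get(uid, ()):
--             if sib in chain_set:
--                 continue
--             l, t = longest(sib, set())
--             if l > best_len:
--                 best_len = l
--                 best = (uid, prev, t, l)
--     return best
-- ===== Notes on version B (the rewrite author's own statement) =====
-- stated objective: alternative
-- what changed: A's _longest_path explores with an explicit stack whose every push copies the whole path list and visited set; B replaces it with a backtracking recursion that keeps one shared visited set and returns only (length, tail) per node, and the outer enumerate/index loop becomes a zip over consecutive chain pairs.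
import Mathlib
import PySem

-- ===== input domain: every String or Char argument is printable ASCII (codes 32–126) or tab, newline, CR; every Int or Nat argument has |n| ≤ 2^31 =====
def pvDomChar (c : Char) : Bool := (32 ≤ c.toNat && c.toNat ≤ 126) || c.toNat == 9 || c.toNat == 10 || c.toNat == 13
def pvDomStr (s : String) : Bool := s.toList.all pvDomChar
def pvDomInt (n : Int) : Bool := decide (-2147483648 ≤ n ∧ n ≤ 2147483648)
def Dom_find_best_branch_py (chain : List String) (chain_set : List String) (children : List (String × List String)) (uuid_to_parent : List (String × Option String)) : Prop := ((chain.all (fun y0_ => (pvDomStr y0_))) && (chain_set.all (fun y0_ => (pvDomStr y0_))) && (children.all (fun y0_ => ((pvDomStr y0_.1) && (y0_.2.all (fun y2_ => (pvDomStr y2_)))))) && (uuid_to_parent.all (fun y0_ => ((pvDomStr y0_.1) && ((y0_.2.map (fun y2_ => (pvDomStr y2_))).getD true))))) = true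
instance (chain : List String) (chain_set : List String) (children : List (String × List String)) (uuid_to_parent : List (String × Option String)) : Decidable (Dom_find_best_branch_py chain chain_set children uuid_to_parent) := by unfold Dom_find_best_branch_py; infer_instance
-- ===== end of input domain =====

-- B replaces A's stack-machine DFS (which copies the whole path and visited set at
-- every push) by a backtracking recursion that keeps only (length, tail) per node;
-- same return value, different algorithmic structure.

-- ===== PORT A =====
-- children.get(node, []) — dict lookup with default (first match, the association-list convention)
def pvCGet (children : List (String × List String)) (node : String) : List String :=
  (PySem.Dict.mk children).getD node []

-- all values that ever appear in a children list; the DFS fuel below is a bound on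
-- the number of machine steps, computed from it (the fuel is a totality guard only:
-- it is proved never to run out)
def pvU (children : List (String × List String)) : List String :=
  (children.map (fun p => p.2)).flatten

def pvFuelA (children : List (String × List String)) : Nat :=
  ((pvU children).length + 1) ^ ((pvU children).length + 2)

-- the while-stack loop of _longest_path, step for step (stack top = list head;
-- Python appends kids then pops from the end, hence kids.reverse ++ rest)
def pvGoA (children : List (String × List String)) (exclude : List String) :
    Nat → List (String × List String × List String) → List String → List String
  | 0, _, best => best   -- fuel exhausted: unreachable (see pvGoA_main / pvMeas lemmas)
  | _ + 1, [], best => best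
  | fuel + 1, (node, path, visited) :: rest, best =>
      let kids := (pvCGet children node).filter
        (fun k => !(PySem.Set.contains exclude k) && !(PySem.Set.contains visited k))
      if kids.isEmpty then
        pvGoA children exclude fuel rest (if best.length < path.length then path else best)
      else
        pvGoA children exclude fuel
          ((kids.reverse.map (fun k => (k, path ++ [k], PySem.Set.add visited k))) ++ rest) best

-- _longest_path(start, children, exclude)
def pvLongestPathA (start : String) (children : List (String × List String))
    (exclude : List String) : List String :=
  pvGoA children exclude (pvFuelA children)
    [(start, [start], PySem.Set.ofList [start])] []

-- _find_best_branch (A): for i, uid in enumerate(chain): …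
def find_best_branch_py (chain : List String) (chain_set : List String) (children : List (String × List String)) (uuid_to_parent : List (String × Option String)) : Option (String × String × String × Int) :=
  ((PySem.List.enumerate chain 0).foldl
    (fun (st : Option (String × String × String × Int) × Int) p =>
      let siblings := (pvCGet children p.2).filter (fun c => !(PySem.Set.contains chain_set c))
      if siblings.isEmpty then st
      else if p.1 == 0 then st
      else
        siblings.foldl
          (fun st sib =>
            let spine := pvLongestPathA sib children chain_set
            if st.2 < (spine.length : Int) then
              (some (p.2, PySem.List.pyGetD chain (p.1 - 1) "",  -- chain[i-1], in range since i ≥ 1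
                     PySem.List.pyGetD spine (-1) "",            -- spine[-1], spine is never empty here
                     (spine.length : Int)), (spine.length : Int))
            else st)
          st)
    (none, 0)).1

-- ===== PORT B =====
-- fuel for B's recursion: one more than the number of listed child uuids; a totality
-- guard only (proved never to run out)
def pvFB (children : List (String × List String)) : Nat := (pvU children).length + 1

-- longest(node, visited) of Source B: (length, tail) of the longest simple downward path
def pvLongestB (children : List (String × List String)) (chain_set : List String) :
    Nat → String → List String → Int × String
  | 0, node, _ => (1, node)   -- fuel exhausted: unreachable
  | fuel + 1, node, visited =>
      let v' := PySem.Set.add visited node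
      (pvCGet children node).reverse.foldl
        (fun acc kid =>
          if PySem.Set.contains chain_set kid || PySem.Set.contains v' kid then acc
          else
            let r := pvLongestB children chain_set fuel kid v'
            if acc.1 < r.1 + 1 then (r.1 + 1, r.2) else acc)
        (1, node)

-- _find_best_branch (B): for prev, uid in zip(chain, chain[1:]): …
def find_best_branch_py_alt (chain : List String) (chain_set : List String) (children : List (String × List String)) (uuid_to_parent : List (String × Option String)) : Option (String × String × String × Int) :=
  ((chain.zip chain.tail).foldl
    (fun (st : Option (String × String × String × Int) × Int) pr =>
      (pvCGet children pr.2).foldl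
        (fun st sib =>
          if PySem.Set.contains chain_set sib then st
          else
            let r := pvLongestB children chain_set (pvFB children) sib PySem.Set.empty
            if st.2 < r.1 then (some (pr.2, pr.1, r.2, r.1), r.1) else st)
        st)
    (none, 0)).1

-- ===== PRECONDITION & SPEC =====
def Spec_find_best_branch_py (chain : List String) (chain_set : List String) (children : List (String × List String)) (uuid_to_parent : List (String × Option String)) (out : Option (String × String × String × Int)) : Prop := out = find_best_branch_py_alt chain chain_set children uuid_to_parent
instance (chain : List String) (chain_set : List String) (children : List (String × List String)) (uuid_to_parent : List (String × Option String)) (out : Option (String × String × String × Int)) : Decidable (Spec_find_best_branch_py chain chain_set children uuid_to_parent out) := by unfold Spec_find_best_branch_py; infer_instance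

-- ===== CLAIM (what is proved, stated in full; the proofs are below) =====
def Claim_equal_find_best_branch_py : Prop := ∀ (chain : List String) (chain_set : List String) (children : List (String × List String)) (uuid_to_parent : List (String × Option String)), Dom_find_best_branch_py chain chain_set children uuid_to_parent → Spec_find_best_branch_py chain chain_set children uuid_to_parent (find_best_branch_py chain chain_set children uuid_to_parent)

-- ===== LEMMAS AND PROOFS =====

-- proof-side abbreviations
def pvRem (children : List (String × List String)) (v : List String) : Nat :=
  ((pvU children).filter (fun x => !(PySem.Set.contains v x))).length

def pvMeas (children : List (String × List String))
    (stack : List (String × List String × List String)) : Nat :=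
  (stack.map (fun s => ((pvU children).length + 1) ^ (pvRem children s.2.2 + 1))).sum

-- "first strictly longer wins" combination step, and the (length, tail) view of a path
def pvStep (b c : Int × String) : Int × String := if b.1 < c.1 then c else b
def pvPhi (p : List String) : Int × String := ((p.length : Int), p.getLastD "")

def pvSummary (children : List (String × List String)) (chain_set : List String)
    (s : String × List String × List String) : Int × String :=
  let r := pvLongestB children chain_set (pvFB children) s.1 s.2.2
  ((s.2.1.length : Int) - 1 + r.1, r.2)

lemma pvLongestB_fst_ge_one (children : List (String × List String)) (cs : List String)
    (f : Nat) (n : String) (v : List String) : 1 ≤ (pvLongestB children cs f n v).1 := by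
  cases f with
  | zero => simp [pvLongestB]
  | succ f =>
    simp only [pvLongestB]
    generalize (pvCGet children n).reverse = l
    have aux : ∀ (l : List String) (acc : Int × String), 1 ≤ acc.1 →
        1 ≤ (l.foldl (fun acc kid =>
          if PySem.Set.contains cs kid || PySem.Set.contains (PySem.Set.add v n) kid then acc
          else
            let r := pvLongestB children cs f kid (PySem.Set.add v n)
            if acc.1 < r.1 + 1 then (r.1 + 1, r.2) else acc) acc).1 := by
      intro l
      induction l with
      | nil => intro acc h; exact h
      | cons k t ih =>
        intro acc h
        simp only [List.foldl_cons]
        apply ih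
        split_ifs with h1 h2
        · exact h
        · dsimp only; omega
        · exact h
    exact aux l (1, n) le_rfl

lemma mem_cget_mem_U (children : List (String × List String)) (n : String) (x : String)
    (h : x ∈ pvCGet children n) : x ∈ pvU children := by
  induction children with
  | nil => simp [pvCGet, PySem.Dict.getD, PySem.Dict.get?] at h
  | cons p rest ih =>
    obtain ⟨k, v⟩ := p
    rw [pvCGet, PySem.Dict.getD_eq_get?_getD, PySem.Dict.get?_mk_cons] at h
    simp only [pvU, List.map_cons, List.flatten_cons, List.mem_append]
    by_cases hk : (k == n) = true
    · left; rw [if_pos hk] at h; simpa using h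
    · right; rw [if_neg hk] at h
      exact ih (by rw [pvCGet, PySem.Dict.getD_eq_get?_getD]; exact h)

lemma length_cget_le (children : List (String × List String)) (n : String) :
    (pvCGet children n).length ≤ (pvU children).length := by
  induction children with
  | nil => simp [pvCGet, PySem.Dict.getD, PySem.Dict.get?]
  | cons p rest ih =>
    obtain ⟨k, v⟩ := p
    rw [pvCGet, PySem.Dict.getD_eq_get?_getD, PySem.Dict.get?_mk_cons]
    simp only [pvU, List.map_cons, List.flatten_cons, List.length_append]
    by_cases hk : (k == n) = true
    · rw [if_pos hk]; simp only [Option.getD_some]; omega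
    · rw [if_neg hk]
      have := ih
      rw [pvCGet, PySem.Dict.getD_eq_get?_getD] at this
      simp only [pvU] at this
      omega

lemma pvRem_le (children : List (String × List String)) (v : List String) :
    pvRem children v ≤ (pvU children).length :=
  List.length_filter_le _ _

lemma pvRem_add_lt (children : List (String × List String)) (v : List String) (x : String)
    (hU : x ∈ pvU children) (hv : PySem.Set.contains v x = false) :
    pvRem children (PySem.Set.add v x) < pvRem children v := by
  have hxv : x ∉ v := by
    intro hm
    rw [(PySem.Set.contains_iff v x).mpr hm] at hv
    exact Bool.true_eq_false.mp hv
  rw [PySem.Set.add_of_not_mem hxv]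
  unfold pvRem
  have hfe : (pvU children).filter (fun y => !(PySem.Set.contains (v ++ [x]) y))
      = ((pvU children).filter (fun y => !(PySem.Set.contains v y))).filter (fun y => !(y == x)) := by
    rw [List.filter_filter]
    apply List.filter_congr
    intro y _
    by_cases h2 : y = x
    · subst h2; simp [List.mem_append, hxv]
    · by_cases h1 : y ∈ v <;> simp [List.mem_append, h1, h2]
  rw [hfe]
  apply List.length_filter_lt_length_iff_exists.mpr
  refine ⟨x, ?_, by simp⟩
  rw [List.mem_filter]
  exact ⟨hU, by simp [hxv]⟩

lemma pvAdd_idem (v : List String) (x : String) :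
    PySem.Set.add (PySem.Set.add v x) x = PySem.Set.add v x :=
  PySem.Set.add_of_mem ((PySem.Set.mem_add v x x).mpr (Or.inr rfl))

lemma pvLongestB_congr (children : List (String × List String)) (cs : List String) :
    ∀ (f g : Nat) (n : String) (v w : List String),
      PySem.Set.add v n = PySem.Set.add w n →
      pvRem children (PySem.Set.add v n) < f →
      pvRem children (PySem.Set.add w n) < g →
      pvLongestB children cs f n v = pvLongestB children cs g n w := by
  intro f
  induction f using Nat.strong_induction_on with
  | _ f ih =>
    intro g n v w hvw hf hg
    match f, g with
    | 0, _ => omega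
    | _ + 1, 0 => omega
    | f + 1, g + 1 =>
      simp only [pvLongestB]
      rw [hvw]
      apply PySem.List.foldl_congr_mem
      intro acc k hk
      by_cases hskip : (PySem.Set.contains cs k || PySem.Set.contains (PySem.Set.add w n) k) = true
      · rw [if_pos hskip, if_pos hskip]
      · rw [if_neg hskip, if_neg hskip]
        have hkU : k ∈ pvU children := mem_cget_mem_U children n k (List.mem_reverse.mp hk)
        have hkv : PySem.Set.contains (PySem.Set.add w n) k = false := by
          rcases Bool.or_eq_false_iff.mp (Bool.eq_false_iff.mpr hskip) with ⟨_, h2⟩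
          exact h2
        have hlt := pvRem_add_lt children (PySem.Set.add w n) k hkU hkv
        have heq : pvLongestB children cs f k (PySem.Set.add w n)
            = pvLongestB children cs g k (PySem.Set.add w n) := by
          apply ih f (Nat.lt_succ_self f) g k
          · rfl
          · rw [← hvw] at hlt ⊢
            omega
          · omega
        rw [heq]


lemma pvFoldl_skip {γ : Type} (p : String → Bool) (g : γ → String → γ) :
    ∀ (l : List String) (acc : γ), (∀ x ∈ l, p x = true) →
      l.foldl (fun a x => if p x then a else g a x) acc = acc := by
  intro l
  induction l with
  | nil => intro acc _; rfl
  | cons k t ih =>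
    intro acc h
    simp only [List.foldl_cons, if_pos (h k (List.mem_cons_self))]
    exact ih acc (fun x hx => h x (List.mem_cons_of_mem _ hx))

lemma pvFoldl_skipIf {γ : Type} (p : String → Bool) (g : γ → String → γ) :
    ∀ (l : List String) (acc : γ),
      l.foldl (fun a x => if p x then a else g a x) acc
        = (l.filter (fun x => !(p x))).foldl g acc := by
  intro l
  induction l with
  | nil => intro acc; rfl
  | cons k t ih =>
    intro acc
    by_cases hk : p k = true <;>
      simp only [List.foldl_cons, List.filter_cons, hk] <;> simp [ih]

lemma pvFold_phase2 (bad : String → Bool) (F : String → Int × String) (c : Int) :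
    ∀ (ks : List String) (b a : Int × String),
      ks.foldl (fun bb k => if bad k then bb else pvStep bb (c + (F k).1, (F k).2))
        (pvStep b (c - 1 + a.1, a.2))
      = pvStep b (c - 1 + (ks.foldl (fun acc k => if bad k then acc
            else if acc.1 < (F k).1 + 1 then ((F k).1 + 1, (F k).2) else acc) a).1,
          (ks.foldl (fun acc k => if bad k then acc
            else if acc.1 < (F k).1 + 1 then ((F k).1 + 1, (F k).2) else acc) a).2) := by
  intro ks
  induction ks with
  | nil => intro b a; rfl
  | cons k t ih =>
    intro b a
    simp only [List.foldl_cons]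
    by_cases hb : bad k = true
    · rw [if_pos hb, if_pos hb]
      exact ih b a
    · rw [if_neg hb, if_neg hb]
      by_cases hcmp : a.1 < (F k).1 + 1
      · rw [if_pos hcmp]
        have hstep : pvStep (pvStep b (c - 1 + a.1, a.2)) (c + (F k).1, (F k).2)
            = pvStep b (c - 1 + ((F k).1 + 1, (F k).2).1, ((F k).1 + 1, (F k).2).2) := by
          unfold pvStep
          dsimp only
          split_ifs <;> first | rfl | (exfalso; omega) | (refine Prod.ext ?_ rfl; dsimp only; omega)
        rw [hstep]
        exact ih b _
      · rw [if_neg hcmp]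
        have hstep : pvStep (pvStep b (c - 1 + a.1, a.2)) (c + (F k).1, (F k).2)
            = pvStep b (c - 1 + a.1, a.2) := by
          unfold pvStep
          dsimp only
          split_ifs <;> first | rfl | (exfalso; omega)
        rw [hstep]
        exact ih b a

lemma pvFold_init (bad : String → Bool) (F : String → Int × String) (c : Int) (n : String)
    (hF : ∀ k, 1 ≤ (F k).1) :
    ∀ (ks : List String) (b : Int × String), (∃ k ∈ ks, bad k = false) →
      ks.foldl (fun bb k => if bad k then bb else pvStep bb (c + (F k).1, (F k).2)) b
      = pvStep b (c - 1 + (ks.foldl (fun acc k => if bad k then acc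
            else if acc.1 < (F k).1 + 1 then ((F k).1 + 1, (F k).2) else acc) ((1 : Int), n)).1,
          (ks.foldl (fun acc k => if bad k then acc
            else if acc.1 < (F k).1 + 1 then ((F k).1 + 1, (F k).2) else acc) ((1 : Int), n)).2) := by
  intro ks
  induction ks with
  | nil => intro b h; simp at h
  | cons k t ih =>
    intro b h
    simp only [List.foldl_cons]
    by_cases hb : bad k = true
    · rw [if_pos hb, if_pos hb]
      apply ih
      rcases h with ⟨k', hk', hbk'⟩
      rcases List.mem_cons.mp hk' with rfl | hmem
      · rw [hb] at hbk'; exact absurd hbk' (by simp)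
      · exact ⟨k', hmem, hbk'⟩
    · rw [if_neg hb, if_neg hb]
      have h1 : ((1 : Int), n).1 < (F k).1 + 1 := by
        have := hF k; dsimp only; omega
      rw [if_pos h1]
      have harith : pvStep b (c + (F k).1, (F k).2)
          = pvStep b (c - 1 + ((F k).1 + 1, (F k).2).1, ((F k).1 + 1, (F k).2).2) := by
        unfold pvStep
        dsimp only
        split_ifs <;> first | rfl | (exfalso; omega) | (refine Prod.ext ?_ rfl; dsimp only; omega)
      rw [harith]
      exact pvFold_phase2 bad F c t b _


lemma pvGoA_main (children : List (String × List String)) (cs : List String) :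
    ∀ (fuel : Nat) (stack : List (String × List String × List String)) (best : List String),
      pvMeas children stack ≤ fuel →
      (∀ s ∈ stack, s.2.1 ≠ [] ∧ s.2.1.getLast? = some s.1 ∧
        PySem.Set.contains s.2.2 s.1 = true) →
      pvPhi (pvGoA children cs fuel stack best)
        = (stack.map (pvSummary children cs)).foldl pvStep (pvPhi best) := by
  intro fuel
  induction fuel with
  | zero =>
    intro stack best hm hinv
    cases stack with
    | nil => rfl
    | cons s rest =>
      exfalso
      have h1 : 1 ≤ ((pvU children).length + 1) ^ (pvRem children s.2.2 + 1) :=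
        Nat.one_le_pow _ _ (by omega)
      simp only [pvMeas, List.map_cons, List.sum_cons] at hm
      omega
  | succ fuel ih =>
    intro stack best hm hinv
    cases stack with
    | nil => rfl
    | cons s rest =>
      obtain ⟨node, path, v⟩ := s
      obtain ⟨hpne, hplast, hvcont⟩ := hinv _ (List.mem_cons_self)
      have hinvrest : ∀ s ∈ rest, s.2.1 ≠ [] ∧ s.2.1.getLast? = some s.1 ∧
          PySem.Set.contains s.2.2 s.1 = true :=
        fun s hs => hinv s (List.mem_cons_of_mem _ hs)
      have hvrw : PySem.Set.add v node = v :=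
        PySem.Set.add_of_mem ((PySem.Set.contains_iff v node).mp hvcont)
      have hone : 1 ≤ ((pvU children).length + 1) ^ (pvRem children v) :=
        Nat.one_le_pow _ _ (by omega)
      simp only [pvGoA]
      by_cases hke : ((pvCGet children node).filter
          (fun k => !(PySem.Set.contains cs k) && !(PySem.Set.contains v k))).isEmpty = true
      · rw [if_pos hke]
        have hrest : pvMeas children rest ≤ fuel := by
          have h1 : 1 ≤ ((pvU children).length + 1) ^ (pvRem children v + 1) :=
            Nat.one_le_pow _ _ (by omega)
          simp only [pvMeas, List.map_cons, List.sum_cons] at hm ⊢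
          omega
        rw [ih rest _ hrest hinvrest]
        simp only [List.map_cons, List.foldl_cons]
        congr 1
        -- r = (1, node) since every child of node is skipped
        have hall : ∀ k ∈ (pvCGet children node).reverse,
            (PySem.Set.contains cs k || PySem.Set.contains v k) = true := by
          intro k hk
          have hk' := List.mem_reverse.mp hk
          have hnp := List.filter_eq_nil_iff.mp (List.isEmpty_iff.mp hke) k hk'
          cases hcs : PySem.Set.contains cs k <;> cases hcv : PySem.Set.contains v k
          case false.true => simp
          case true.false => simp
          case true.true => simp
          case false.false => exact absurd (by rw [hcs, hcv]; rfl) hnp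
        have hr : pvLongestB children cs (pvFB children) node v = (1, node) := by
          show pvLongestB children cs ((pvU children).length + 1) node v = (1, node)
          simp only [pvLongestB]
          rw [hvrw]
          exact pvFoldl_skip _ _ _ _ hall
        have hsum : pvSummary children cs (node, path, v) = ((path.length : Int), node) := by
          simp only [pvSummary, hr]
          refine Prod.ext ?_ rfl
          dsimp only
          omega
        rw [hsum]
        have hlastD : path.getLastD "" = node := by
          rw [List.getLastD_eq_getLast?, hplast]; rfl
        unfold pvPhi pvStep
        dsimp only
        by_cases hlt : best.length < path.length
        · rw [if_pos hlt, if_pos (by exact_mod_cast hlt)]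
          rw [hlastD]
        · rw [if_neg hlt, if_neg (by exact_mod_cast hlt)]
      · rw [if_neg hke]
        have hkne : (pvCGet children node).filter
            (fun k => !(PySem.Set.contains cs k) && !(PySem.Set.contains v k)) ≠ [] := by
          intro h; rw [h] at hke; exact hke rfl
        have hkfacts : ∀ k ∈ (pvCGet children node).filter
            (fun k => !(PySem.Set.contains cs k) && !(PySem.Set.contains v k)),
            PySem.Set.contains cs k = false ∧ PySem.Set.contains v k = false ∧
              k ∈ pvU children := by
          intro k hk
          obtain ⟨hmemK, hgood⟩ := List.mem_filter.mp hk
          obtain ⟨hg1, hg2⟩ := Bool.and_eq_true_iff.mp hgood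
          refine ⟨?_, ?_, mem_cget_mem_U children node k hmemK⟩
          · cases h : PySem.Set.contains cs k
            · rfl
            · rw [h] at hg1; simp at hg1
          · cases h : PySem.Set.contains v k
            · rfl
            · rw [h] at hg2; simp at hg2
        have hmeasnew : pvMeas children
            (((pvCGet children node).filter
              (fun k => !(PySem.Set.contains cs k) && !(PySem.Set.contains v k))).reverse.map
                (fun k => (k, path ++ [k], PySem.Set.add v k)))
            ≤ ((pvCGet children node).filter
              (fun k => !(PySem.Set.contains cs k) && !(PySem.Set.contains v k))).length
              * ((pvU children).length + 1) ^ (pvRem children v) := by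
          simp only [pvMeas, List.map_map]
          have hb := List.sum_le_card_nsmul
            ((((pvCGet children node).filter
              (fun k => !(PySem.Set.contains cs k) && !(PySem.Set.contains v k))).reverse).map
              (fun k => ((pvU children).length + 1) ^ (pvRem children (PySem.Set.add v k) + 1)))
            (((pvU children).length + 1) ^ (pvRem children v)) ?_
          · simpa [smul_eq_mul] using hb
          · intro x hx
            obtain ⟨k, hk, rfl⟩ := List.mem_map.mp hx
            have hk' := List.mem_reverse.mp hk
            obtain ⟨hc1, hc2, hc3⟩ := hkfacts k hk'
            have hlt := pvRem_add_lt children v k hc3 hc2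
            exact Nat.pow_le_pow_right (by omega) (by omega)
        have hmeasapp : pvMeas children
            ((((pvCGet children node).filter
              (fun k => !(PySem.Set.contains cs k) && !(PySem.Set.contains v k))).reverse.map
                (fun k => (k, path ++ [k], PySem.Set.add v k))) ++ rest) ≤ fuel := by
          have hsplit : ∀ (a b : List (String × List String × List String)),
              pvMeas children (a ++ b) = pvMeas children a + pvMeas children b := by
            intro a b; simp [pvMeas]
          rw [hsplit]
          have hcons : pvMeas children ((node, path, v) :: rest)
              = ((pvU children).length + 1) ^ (pvRem children v + 1) + pvMeas children rest := by
            simp [pvMeas]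
          rw [hcons] at hm
          have hklen : ((pvCGet children node).filter
              (fun k => !(PySem.Set.contains cs k) && !(PySem.Set.contains v k))).length
              ≤ (pvU children).length :=
            le_trans (List.length_filter_le _ _) (length_cget_le children node)
          have hmul : ((pvCGet children node).filter
              (fun k => !(PySem.Set.contains cs k) && !(PySem.Set.contains v k))).length
              * ((pvU children).length + 1) ^ (pvRem children v)
              ≤ (pvU children).length * ((pvU children).length + 1) ^ (pvRem children v) :=
            Nat.mul_le_mul_right _ hklen
          have hpows : ((pvU children).length + 1) ^ (pvRem children v + 1)
              = ((pvU children).length + 1) ^ (pvRem children v) * ((pvU children).length + 1) :=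
            pow_succ _ _
          have hring : (pvU children).length * ((pvU children).length + 1) ^ (pvRem children v)
                + ((pvU children).length + 1) ^ (pvRem children v)
              = ((pvU children).length + 1) ^ (pvRem children v) * ((pvU children).length + 1) := by
            ring
          omega
        have hinvnew : ∀ s ∈ (((pvCGet children node).filter
              (fun k => !(PySem.Set.contains cs k) && !(PySem.Set.contains v k))).reverse.map
                (fun k => (k, path ++ [k], PySem.Set.add v k))) ++ rest,
            s.2.1 ≠ [] ∧ s.2.1.getLast? = some s.1 ∧
              PySem.Set.contains s.2.2 s.1 = true := by
          intro s hs
          rcases List.mem_append.mp hs with hs | hs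
          · obtain ⟨k, _, rfl⟩ := List.mem_map.mp hs
            refine ⟨by simp, List.getLast?_concat, ?_⟩
            exact (PySem.Set.contains_iff _ _).mpr ((PySem.Set.mem_add v k k).mpr (Or.inr rfl))
          · exact hinvrest s hs
        rw [ih _ _ hmeasapp hinvnew]
        simp only [List.map_append, List.foldl_append, List.map_cons, List.foldl_cons]
        congr 1
        -- the pushed block folds to one pvStep with B's recursion at node
        rw [List.map_map]
        have hmap : (((pvCGet children node).filter
              (fun k => !(PySem.Set.contains cs k) && !(PySem.Set.contains v k))).reverse.map
              ((pvSummary children cs) ∘ (fun k => (k, path ++ [k], PySem.Set.add v k))))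
            = ((pvCGet children node).filter
              (fun k => !(PySem.Set.contains cs k) && !(PySem.Set.contains v k))).reverse.map
              (fun k => ((path.length : Int)
                  + (pvLongestB children cs (pvFB children) k (PySem.Set.add v k)).1,
                (pvLongestB children cs (pvFB children) k (PySem.Set.add v k)).2)) := by
          apply List.map_congr_left
          intro k _
          simp only [Function.comp, pvSummary]
          refine Prod.ext ?_ rfl
          dsimp only
          have : ((path ++ [k]).length : Int) = (path.length : Int) + 1 := by
            simp [List.length_append]
          rw [this]
          omega
        rw [hmap, List.foldl_map, ← List.filter_reverse]
        have hfg : (pvCGet children node).reverse.filter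
              (fun k => !(PySem.Set.contains cs k || PySem.Set.contains v k))
            = (pvCGet children node).reverse.filter
              (fun k => !(PySem.Set.contains cs k) && !(PySem.Set.contains v k)) := by
          apply List.filter_congr
          intro k _
          rw [Bool.not_or]
        rw [← hfg, ← pvFoldl_skipIf]
        have hexists : ∃ k ∈ (pvCGet children node).reverse,
            (PySem.Set.contains cs k || PySem.Set.contains v k) = false := by
          obtain ⟨k, hk⟩ := List.exists_mem_of_ne_nil _ hkne
          obtain ⟨hc1, hc2, _⟩ := hkfacts k hk
          refine ⟨k, List.mem_reverse.mpr (List.mem_filter.mp hk).1, ?_⟩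
          rw [hc1, hc2]
          rfl
        rw [pvFold_init (fun k => PySem.Set.contains cs k || PySem.Set.contains v k)
          (fun k => pvLongestB children cs (pvFB children) k (PySem.Set.add v k))
          ((path.length : Int)) node
          (fun k => pvLongestB_fst_ge_one children cs (pvFB children) k (PySem.Set.add v k))
          ((pvCGet children node).reverse) (pvPhi best) hexists]
        have hRQ : pvLongestB children cs (pvFB children) node v
            = (pvCGet children node).reverse.foldl (fun acc k =>
                if (PySem.Set.contains cs k || PySem.Set.contains v k) then acc
                else if acc.1 < (pvLongestB children cs (pvFB children) k (PySem.Set.add v k)).1 + 1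
                  then ((pvLongestB children cs (pvFB children) k (PySem.Set.add v k)).1 + 1,
                    (pvLongestB children cs (pvFB children) k (PySem.Set.add v k)).2)
                  else acc) ((1 : Int), node) := by
          show pvLongestB children cs ((pvU children).length + 1) node v = _
          simp only [pvLongestB]
          rw [hvrw]
          apply PySem.List.foldl_congr_mem
          intro acc k hkmem
          by_cases hbad : (PySem.Set.contains cs k || PySem.Set.contains v k) = true
          · rw [if_pos hbad, if_pos hbad]
          · rw [if_neg hbad, if_neg hbad]
            obtain ⟨hcsf, hcvf⟩ := Bool.or_eq_false_iff.mp (Bool.eq_false_iff.mpr hbad)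
            have hkK : k ∈ pvCGet children node := List.mem_reverse.mp hkmem
            have hkU := mem_cget_mem_U children node k hkK
            have hlt := pvRem_add_lt children v k hkU hcvf
            have hrle := pvRem_le children v
            have hcongr : pvLongestB children cs ((pvU children).length) k v
                = pvLongestB children cs (pvFB children) k (PySem.Set.add v k) := by
              apply pvLongestB_congr children cs _ _ k v (PySem.Set.add v k)
              · rw [pvAdd_idem]
              · omega
              · rw [pvAdd_idem]
                show pvRem children (PySem.Set.add v k) < (pvU children).length + 1
                omega
            simp only [hcongr]
        rw [← hRQ]
        rfl


-- the two loop bodies, named for the proofs (definitionally the ports' inline lambdas)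
def pvBodyA (chain : List String) (cs : List String) (children : List (String × List String))
    (st : Option (String × String × String × Int) × Int) (p : Int × String) :
    Option (String × String × String × Int) × Int :=
  let siblings := (pvCGet children p.2).filter (fun c => !(PySem.Set.contains cs c))
  if siblings.isEmpty then st
  else if p.1 == 0 then st
  else
    siblings.foldl
      (fun st sib =>
        let spine := pvLongestPathA sib children cs
        if st.2 < (spine.length : Int) then
          (some (p.2, PySem.List.pyGetD chain (p.1 - 1) "",
                 PySem.List.pyGetD spine (-1) "",
                 (spine.length : Int)), (spine.length : Int))
        else st)
      st

def pvBodyB (cs : List String) (children : List (String × List String))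
    (st : Option (String × String × String × Int) × Int) (pr : String × String) :
    Option (String × String × String × Int) × Int :=
  (pvCGet children pr.2).foldl
    (fun st sib =>
      if PySem.Set.contains cs sib then st
      else
        let r := pvLongestB children cs (pvFB children) sib PySem.Set.empty
        if st.2 < r.1 then (some (pr.2, pr.1, r.2, r.1), r.1) else st)
    st

lemma pvPortA_eq (chain cs : List String) (children : List (String × List String))
    (u : List (String × Option String)) :
    find_best_branch_py chain cs children u
      = ((PySem.List.enumerate chain 0).foldl (pvBodyA chain cs children) (none, 0)).1 := rfl

lemma pvPortB_eq (chain cs : List String) (children : List (String × List String))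
    (u : List (String × Option String)) :
    find_best_branch_py_alt chain cs children u
      = ((chain.zip chain.tail).foldl (pvBodyB cs children) (none, 0)).1 := rfl

lemma pvSpine (children : List (String × List String)) (cs : List String) (sib : String) :
    pvPhi (pvLongestPathA sib children cs)
      = pvLongestB children cs (pvFB children) sib PySem.Set.empty := by
  unfold pvLongestPathA
  rw [pvGoA_main children cs (pvFuelA children) [(sib, [sib], PySem.Set.ofList [sib])] []
    (by
      simp only [pvMeas, List.map_cons, List.map_nil, List.sum_cons, List.sum_nil, pvFuelA]
      have hle := pvRem_le children (PySem.Set.ofList [sib])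
      have hpw : ((pvU children).length + 1) ^ (pvRem children (PySem.Set.ofList [sib]) + 1)
          ≤ ((pvU children).length + 1) ^ ((pvU children).length + 2) :=
        Nat.pow_le_pow_right (by omega) (by omega)
      omega)
    (by
      intro s hs
      rcases List.mem_cons.mp hs with rfl | h
      · refine ⟨by simp, rfl, ?_⟩
        exact (PySem.Set.contains_iff _ _).mpr
          ((PySem.Set.mem_add PySem.Set.empty sib sib).mpr (Or.inr rfl))
      · simp at h)]
  simp only [List.map_cons, List.map_nil, List.foldl_cons, List.foldl_nil]
  have hcongr : pvLongestB children cs (pvFB children) sib (PySem.Set.ofList [sib])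
      = pvLongestB children cs (pvFB children) sib PySem.Set.empty := by
    apply pvLongestB_congr children cs _ _ sib _ _
    · show PySem.Set.add (PySem.Set.add PySem.Set.empty sib) sib
        = PySem.Set.add PySem.Set.empty sib
      exact pvAdd_idem _ _
    · show pvRem children (PySem.Set.add (PySem.Set.add PySem.Set.empty sib) sib) < pvFB children
      rw [pvAdd_idem]
      have := pvRem_le children (PySem.Set.add PySem.Set.empty sib)
      simp only [pvFB]; omega
    · have := pvRem_le children (PySem.Set.add PySem.Set.empty sib)
      simp only [pvFB]; omega
  have hsum : pvSummary children cs (sib, [sib], PySem.Set.ofList [sib])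
      = pvLongestB children cs (pvFB children) sib PySem.Set.empty := by
    simp only [pvSummary, hcongr]
    refine Prod.ext ?_ rfl
    dsimp only
    simp
  rw [hsum]
  have hge := pvLongestB_fst_ge_one children cs (pvFB children) sib PySem.Set.empty
  unfold pvPhi pvStep
  dsimp only
  rw [if_pos (by simpa using (by omega :
    (0 : Int) < (pvLongestB children cs (pvFB children) sib PySem.Set.empty).1))]

lemma pvBody_eq (chain cs : List String) (children : List (String × List String))
    (st : Option (String × String × String × Int) × Int) (i : Int) (uid prev : String)
    (hi : (i == (0 : Int)) = false)
    (hprev : PySem.List.pyGetD chain (i - 1) "" = prev) :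
    pvBodyA chain cs children st (i, uid) = pvBodyB cs children st (prev, uid) := by
  unfold pvBodyA pvBodyB
  dsimp only
  by_cases hemp : ((pvCGet children uid).filter (fun c => !(PySem.Set.contains cs c))).isEmpty = true
  · rw [if_pos hemp]
    symm
    apply pvFoldl_skip
    intro x hx
    have hnp := List.filter_eq_nil_iff.mp (List.isEmpty_iff.mp hemp) x hx
    cases h : PySem.Set.contains cs x
    · exfalso; apply hnp; rw [h]; rfl
    · rfl
  · rw [if_neg hemp, if_neg (by simp [hi] : ¬ ((i == (0:Int)) = true)), pvFoldl_skipIf]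
    apply PySem.List.foldl_congr_mem
    intro acc sib _
    have hphi := pvSpine children cs sib
    have hlen : ((pvLongestPathA sib children cs).length : Int)
        = (pvLongestB children cs (pvFB children) sib PySem.Set.empty).1 :=
      congrArg Prod.fst hphi
    have hge := pvLongestB_fst_ge_one children cs (pvFB children) sib PySem.Set.empty
    have hne : pvLongestPathA sib children cs ≠ [] := by
      have hlp : (1 : Int) ≤ ((pvLongestPathA sib children cs).length : Int) := by
        rw [hlen]; exact hge
      intro h
      rw [h] at hlp
      simp at hlp
    have htail : PySem.List.pyGetD (pvLongestPathA sib children cs) (-1) ""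
        = (pvLongestB children cs (pvFB children) sib PySem.Set.empty).2 := by
      rw [PySem.List.pyGetD_neg_one _ _ hne]
      have h2 := congrArg Prod.snd hphi
      simp only [pvPhi] at h2
      rw [← h2, List.getLastD_eq_getLast?, List.getLast?_eq_some_getLast hne]
      rfl
    rw [hlen, htail, hprev]

lemma pvOuter (cs : List String) (children : List (String × List String)) :
    ∀ (post pre chain : List String) (st : Option (String × String × String × Int) × Int),
      pre ≠ [] → chain = pre ++ post →
      (PySem.List.enumerate post (pre.length : Int)).foldl (pvBodyA chain cs children) st
        = ((pre.getLastD "" :: post).zip post).foldl (pvBodyB cs children) st := by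
  intro post
  induction post with
  | nil => intro pre chain st _ _; rfl
  | cons uid post' ih =>
    intro pre chain st hpre hchain
    rw [PySem.List.enumerate_cons]
    simp only [List.zip_cons_cons, List.foldl_cons]
    have hi : ((pre.length : Int) == 0) = false := by
      have h0 : pre.length ≠ 0 := by
        cases pre
        · exact absurd rfl hpre
        · simp
      simp [h0]
    have hprev : PySem.List.pyGetD chain ((pre.length : Int) - 1) "" = pre.getLastD "" := by
      subst hchain
      have h1 : 1 ≤ pre.length := by
        cases pre
        · exact absurd rfl hpre
        · simp
      have h2 : (pre.length : Int) - 1 = ((pre.length - 1 : Nat) : Int) := by push_cast [h1]; ring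
      rw [h2, PySem.List.pyGetD_natCast]
      have h3 : pre.length - 1 < pre.length := by omega
      rw [List.getD_eq_getElem?_getD, List.getElem?_append_left h3]
      rw [← List.getLast?_eq_getElem?]
      rw [List.getLastD_eq_getLast?]
    rw [pvBody_eq chain cs children st (pre.length : Int) uid (pre.getLastD "") hi hprev]
    have happ : chain = (pre ++ [uid]) ++ post' := by rw [hchain]; simp
    have hrec := ih (pre ++ [uid]) chain (pvBodyB cs children st (pre.getLastD "", uid))
      (by simp) happ
    simp only [List.length_append, List.length_cons, List.length_nil, List.getLastD_concat] at hrec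
    have hcast : ((pre.length + (0 + 1) : Nat) : Int) = (pre.length : Int) + 1 := by push_cast; ring
    rw [hcast] at hrec
    exact hrec

theorem find_best_branch_py_spec : Claim_equal_find_best_branch_py := by
  intro chain cs children u _hdom
  unfold Spec_find_best_branch_py
  cases chain with
  | nil => rfl
  | cons c rest =>
    rw [pvPortA_eq, pvPortB_eq]
    rw [PySem.List.enumerate_cons, List.foldl_cons]
    have hhead : pvBodyA (c :: rest) cs children (none, 0) ((0 : Int), c) = (none, 0) := by
      unfold pvBodyA
      dsimp only
      split_ifs with h1 h2
      · rfl
      · rfl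
      · exfalso; apply h2; rfl
    rw [hhead]
    have hout := pvOuter cs children rest [c] (c :: rest) (none, 0) (by simp) rfl
    norm_num at hout
    have h01 : (0 : Int) + 1 = 1 := by norm_num
    rw [h01]
    exact congrArg Prod.fst hout
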